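-- pv_equiv track=rewrite | github.com/isaacwasserman/ml-final-project | word_gan/train.py | clean_stems
-- ===== SOURCE A (Python) =====
-- def get_chars(l):
--     flat_list = [char for word in l for char in word]
--     return list(set(flat_list))
--
-- def get_vocab(strings):
--     return sorted(list(get_chars(strings)))
--
-- def clean_stems(affirmative_stems, negative_stems):
--     excluded_chars = [",","'","/","*","-","1","2","3","4","5","6","7","8","9"]
--     affirmative_vocab = get_vocab(affirmative_stems)
--     to_be_excluded = []
--     for i,stem in enumerate(negative_stems):
--         for char in stem:
--             if char not in affirmative_vocab or char in excluded_chars: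
--                 to_be_excluded.append(i)
--                 break
--     new_negative_stems = []
--     new_affirmative_stems = []
--     for i,stem in enumerate(negative_stems):
--         if i not in to_be_excluded:
--             new_negative_stems.append([character.lower() for character in stem])
--     for i,stem in enumerate(affirmative_stems):
--         reject = False
--         for char in stem:
--             if char in excluded_chars:
--                 reject = True
--         if not reject:
--             new_affirmative_stems.append([character.lower() for character in stem])
--     return new_affirmative_stems, new_negative_stems
-- ===== SOURCE B (Python) =====
-- def clean_stems(affirmative_stems, negative_stems):
--     excluded = set(",'/*-123456789")
--     vocab = {char for stem in affirmative_stems for char in stem}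
--     new_affirmative_stems = [
--         [char.lower() for char in stem]
--         for stem in affirmative_stems
--         if all(char not in excluded for char in stem)
--     ]
--     new_negative_stems = [
--         [char.lower() for char in stem]
--         for stem in negative_stems
--         if all(char in vocab and char not in excluded for char in stem)
--     ]
--     return new_affirmative_stems, new_negative_stems
-- ===== Notes on version B (the rewrite author's own statement) =====
-- stated objective: simpler
-- what changed: Replaced A's two-phase negative handling (build a to_be_excluded index list, then a second indexed scan skipping those indices) and its list-based vocab membership with a single filter pass per list against a precomputed vocab/excluded set, dropping the index bookkeeping entirely.
import Mathlib
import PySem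

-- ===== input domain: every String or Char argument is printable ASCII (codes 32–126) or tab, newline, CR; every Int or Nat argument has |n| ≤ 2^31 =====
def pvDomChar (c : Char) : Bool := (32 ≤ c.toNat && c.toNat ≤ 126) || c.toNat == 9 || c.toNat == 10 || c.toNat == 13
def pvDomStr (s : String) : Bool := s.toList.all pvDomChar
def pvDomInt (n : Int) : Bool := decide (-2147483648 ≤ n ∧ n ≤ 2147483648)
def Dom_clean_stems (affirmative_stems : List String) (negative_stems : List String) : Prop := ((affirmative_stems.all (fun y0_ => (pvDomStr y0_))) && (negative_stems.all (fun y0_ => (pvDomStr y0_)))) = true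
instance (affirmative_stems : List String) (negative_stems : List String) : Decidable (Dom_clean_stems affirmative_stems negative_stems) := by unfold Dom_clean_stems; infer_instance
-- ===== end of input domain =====

-- B replaces A's two-phase negative handling (build a to_be_excluded index list, then a second
-- indexed scan) by a single filter with a set-based membership predicate; objective: simpler.


-- ===== PORT A =====
-- excluded_chars = [",","'","/","*","-","1",…,"9"] (1-char strings, ported as Char)
def pyExcludedChars : List Char :=
  [',', '\'', '/', '*', '-', '1', '2', '3', '4', '5', '6', '7', '8', '9']

-- get_chars: list(set(flat_list)); only membership/sorted of the result is used
def get_chars (l : List String) : List Char :=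
  let flat_list := l.flatMap (fun word => word.toList)
  PySem.Set.ofList flat_list

def get_vocab (strings : List String) : List Char :=
  PySem.List.sorted (get_chars strings) (fun x => x) false

-- first loop: for i,stem in enumerate(negative_stems): for char in stem: if bad: append(i); break
def tbeLoop (vocab : List Char) (i : Nat) : List String → List Nat
  | [] => []
  | stem :: rest =>
    if stem.toList.any (fun c => !(vocab.contains c) || pyExcludedChars.contains c)
    then i :: tbeLoop vocab (i + 1) rest
    else tbeLoop vocab (i + 1) rest

-- second loop: for i,stem in enumerate(negative_stems): if i not in to_be_excluded: append(lowered)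
def negLoop (tbe : List Nat) (i : Nat) : List String → List (List String)
  | [] => []
  | stem :: rest =>
    if tbe.contains i then negLoop tbe (i + 1) rest
    else (stem.toList.map (fun character => PySem.Str.lower (String.ofList [character]))) :: negLoop tbe (i + 1) rest

-- third loop: reject flag accumulated over the whole stem (no break), then maybe append
def affLoop : List String → List (List String)
  | [] => []
  | stem :: rest =>
    let reject := stem.toList.foldl (fun r char => if pyExcludedChars.contains char then true else r) false
    if !reject
    then (stem.toList.map (fun character => PySem.Str.lower (String.ofList [character]))) :: affLoop rest
    else affLoop rest

def clean_stems (affirmative_stems : List String) (negative_stems : List String) : List (List String) × List (List String) :=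
  let affirmative_vocab := get_vocab affirmative_stems
  let to_be_excluded := tbeLoop affirmative_vocab 0 negative_stems
  let new_negative_stems := negLoop to_be_excluded 0 negative_stems
  let new_affirmative_stems := affLoop affirmative_stems
  (new_affirmative_stems, new_negative_stems)

-- ===== PORT B =====
def altExcluded : List Char := ",'/*-123456789".toList

def altLowerStem (stem : String) : List String :=
  stem.toList.map (fun char => PySem.Str.lower (String.ofList [char]))

def clean_stems_alt (affirmative_stems : List String) (negative_stems : List String) : List (List String) × List (List String) :=
  let vocab : PySem.Set Char := PySem.Set.ofList (affirmative_stems.flatMap (fun stem => stem.toList))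
  let new_affirmative_stems :=
    (affirmative_stems.filter (fun stem => stem.toList.all (fun char => !altExcluded.contains char))).map altLowerStem
  let new_negative_stems :=
    (negative_stems.filter (fun stem => stem.toList.all (fun char => PySem.Set.contains vocab char && !altExcluded.contains char))).map altLowerStem
  (new_affirmative_stems, new_negative_stems)

-- ===== PRECONDITION & SPEC =====
def Spec_clean_stems (affirmative_stems : List String) (negative_stems : List String) (out : List (List String) × List (List String)) : Prop := out = clean_stems_alt affirmative_stems negative_stems
instance (affirmative_stems : List String) (negative_stems : List String) (out : List (List String) × List (List String)) : Decidable (Spec_clean_stems affirmative_stems negative_stems out) := by unfold Spec_clean_stems; infer_instance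

-- ===== CLAIM (what is proved, stated in full; the proofs are below) =====
def Claim_equal_clean_stems : Prop := ∀ (affirmative_stems : List String) (negative_stems : List String), Dom_clean_stems affirmative_stems negative_stems → Spec_clean_stems affirmative_stems negative_stems (clean_stems affirmative_stems negative_stems)

-- ===== LEMMAS AND PROOFS =====

-- membership in the sorted vocab list coincides with membership in B's set
lemma vocab_contains (aff : List String) (c : Char) :
    (get_vocab aff).contains c
      = PySem.Set.contains (PySem.Set.ofList (aff.flatMap (fun stem => stem.toList))) c := by
  simp [get_vocab, get_chars, PySem.List.mem_sorted, PySem.Set.mem_ofList,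
    PySem.Set.contains_eq_listContains]

-- the two excluded-character literals are the same list
lemma excluded_eq : altExcluded = pyExcludedChars := by decide

-- B's keep-test is the negation of A's per-stem exclusion test
lemma good_eq_not_bad (vocab : List Char) (cs : List Char) :
    cs.all (fun c => vocab.contains c && !pyExcludedChars.contains c)
      = !cs.any (fun c => !(vocab.contains c) || pyExcludedChars.contains c) := by
  induction cs with
  | nil => rfl
  | cons x xs ih =>
    simp only [List.all_cons, List.any_cons, Bool.not_or, ih]
    cases hv : vocab.contains x <;> cases he : pyExcludedChars.contains x <;> simp

-- every index produced by tbeLoop with start i is ≥ i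
lemma tbe_ge (vocab : List Char) (neg : List String) (i : Nat) :
    ∀ j ∈ tbeLoop vocab i neg, i ≤ j := by
  induction neg generalizing i with
  | nil => simp [tbeLoop]
  | cons s rest ih =>
    intro j hj
    unfold tbeLoop at hj
    split at hj
    · rcases List.mem_cons.1 hj with h | h
      · omega
      · have := ih (i + 1) j h; omega
    · have := ih (i + 1) j hj; omega

-- the indexed exclusion pass is a direct filter-then-map
lemma negLoop_eq (vocab : List Char) (neg : List String) (i : Nat) (pre : List Nat)
    (hpre : ∀ j ∈ pre, j < i) :
    negLoop (pre ++ tbeLoop vocab i neg) i neg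
      = (neg.filter (fun stem => stem.toList.all
            (fun c => vocab.contains c && !pyExcludedChars.contains c))).map altLowerStem := by
  induction neg generalizing i pre with
  | nil => rfl
  | cons stem rest ih =>
    unfold tbeLoop negLoop
    cases hb : stem.toList.any (fun c => !(vocab.contains c) || pyExcludedChars.contains c) with
    | true =>
      have hmem : (pre ++ i :: tbeLoop vocab (i + 1) rest).contains i = true := by simp
      rw [if_pos rfl, hmem, if_pos rfl]
      have hassoc : pre ++ i :: tbeLoop vocab (i + 1) rest
          = (pre ++ [i]) ++ tbeLoop vocab (i + 1) rest := by simp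
      have hpre' : ∀ j ∈ pre ++ [i], j < i + 1 := by
        intro j hj
        rcases List.mem_append.1 hj with h | h
        · exact Nat.lt_succ_of_lt (hpre j h)
        · simp at h; omega
      rw [hassoc, ih (i + 1) (pre ++ [i]) hpre']
      have : (stem.toList.all (fun c => vocab.contains c && !pyExcludedChars.contains c)) = false := by
        rw [good_eq_not_bad, hb]; rfl
      simp only [List.filter_cons, this, Bool.false_eq_true, if_false]
    | false =>
      have hnot : (pre ++ tbeLoop vocab (i + 1) rest).contains i = false := by
        simp only [List.contains_eq_mem, decide_eq_false_iff_not, List.mem_append, not_or]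
        exact ⟨fun h => absurd (hpre i h) (lt_irrefl i),
               fun h => by have := tbe_ge vocab rest (i + 1) i h; omega⟩
      simp only [Bool.false_eq_true, if_false, hnot]
      rw [ih (i + 1) pre (by intro j hj; exact Nat.lt_succ_of_lt (hpre j hj))]
      have : (stem.toList.all (fun c => vocab.contains c && !pyExcludedChars.contains c)) = true := by
        rw [good_eq_not_bad, hb]; rfl
      simp only [List.filter_cons, this, if_true, List.map_cons, altLowerStem]

-- the reject-flag loop is List.any
lemma reject_eq (cs : List Char) (b : Bool) :
    cs.foldl (fun r char => if pyExcludedChars.contains char then true else r) b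
      = (b || cs.any (fun c => pyExcludedChars.contains c)) := by
  induction cs generalizing b with
  | nil => simp
  | cons x xs ih => rw [List.foldl_cons, ih]; cases hp : pyExcludedChars.contains x <;> cases b <;> simp_all

-- the affirmative loop is a filter-then-map
lemma affLoop_eq (aff : List String) :
    affLoop aff = (aff.filter (fun stem => stem.toList.all
        (fun char => !altExcluded.contains char))).map altLowerStem := by
  induction aff with
  | nil => rfl
  | cons stem rest ih =>
    unfold affLoop
    rw [reject_eq, ih]
    cases ha : stem.toList.any (fun c => pyExcludedChars.contains c) with
    | true =>
      have : (stem.toList.all (fun char => !altExcluded.contains char)) = false := by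
        rw [excluded_eq]; simp at ha ⊢; exact ha
      rw [List.filter_cons, this]; simp
    | false =>
      have : (stem.toList.all (fun char => !altExcluded.contains char)) = true := by
        rw [excluded_eq]; simp at ha ⊢; exact ha
      rw [List.filter_cons, this]; simp [altLowerStem]


-- the filter predicates of the two negative passes agree pointwise
lemma pred_eq (aff : List String) :
    (fun stem : String => stem.toList.all
        (fun c => (get_vocab aff).contains c && !pyExcludedChars.contains c))
      = (fun stem : String => stem.toList.all
        (fun c => PySem.Set.contains (PySem.Set.ofList (aff.flatMap (fun s => s.toList))) c
          && !altExcluded.contains c)) := by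
  funext stem
  congr 1
  funext c
  rw [vocab_contains, excluded_eq]

-- ===== VERDICT (by name: the statement is the Claim_ definition above) =====
theorem clean_stems_spec : Claim_equal_clean_stems := by
  intro aff neg _
  unfold Spec_clean_stems
  have hneg := negLoop_eq (get_vocab aff) neg 0 [] (by simp)
  rw [List.nil_append, pred_eq aff] at hneg
  simp only [clean_stems, clean_stems_alt, affLoop_eq, hneg]
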